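-- pv_equiv track=rewrite | github.com/mikedasquirrel/namesake | analyzers/domain_formula_optimizer.py | _count_consonant_clusters
-- ===== SOURCE A (Python) =====
-- def _count_consonant_clusters(text: str) -> int:
--     """Count consonant clusters (2+ consecutive consonants)"""
--     text = text.lower()
--     clusters = 0
--     consonant_run = 0
--
--     for char in text:
--         if char.isalpha() and char not in 'aeiou':
--             consonant_run += 1
--         else:
--             if consonant_run >= 2:
--                 clusters += 1
--             consonant_run = 0
--
--     if consonant_run >= 2:
--         clusters += 1
--
--     return clusters
-- ===== SOURCE B (Python) =====
-- def _count_consonant_clusters(text: str) -> int: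
--     """Count consonant clusters (2+ consecutive consonants)"""
--     bs = [c.isalpha() and c not in 'aeiou' for c in text.lower()]
--     return sum(1 for p, c, n in zip([False] + bs, bs, bs[1:] + [False])
--                if not p and c and n)
-- ===== Notes on version B (the rewrite author's own statement) =====
-- stated objective: idiomatic
-- what changed: Replaces the running consonant-counter with end-of-string flush by a stateless one-liner: build the consonant mask and count positions where a consonant followed by a consonant is not preceded by one (each cluster counted at its start via a padded 3-way zip).
import Mathlib
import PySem

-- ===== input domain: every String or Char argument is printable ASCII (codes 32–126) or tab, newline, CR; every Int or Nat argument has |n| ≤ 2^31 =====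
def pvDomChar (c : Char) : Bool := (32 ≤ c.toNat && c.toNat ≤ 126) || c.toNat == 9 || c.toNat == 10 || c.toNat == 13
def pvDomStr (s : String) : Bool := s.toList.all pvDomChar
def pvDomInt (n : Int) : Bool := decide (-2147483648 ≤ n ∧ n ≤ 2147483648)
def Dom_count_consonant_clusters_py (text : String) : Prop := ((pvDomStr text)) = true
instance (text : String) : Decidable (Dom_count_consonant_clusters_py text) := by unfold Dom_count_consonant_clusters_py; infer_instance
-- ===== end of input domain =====

-- B counts each cluster at its first two consonants via a padded 3-way zip instead of A's
-- running counter with an end-of-string flush; same cost, stateless and more idiomatic.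

-- ===== PORT A =====
-- char.isalpha() and char not in 'aeiou'
def pvIsCons (c : Char) : Bool := PySem.Chars.isalpha c && !("aeiou".toList.contains c)

def count_consonant_clusters_py (text : String) : Int :=
  let t := PySem.Chars.lower text.toList
  let s := t.foldl (fun (st : Int × Int) c =>
    if pvIsCons c then (st.1, st.2 + 1)
    else (if st.2 ≥ 2 then st.1 + 1 else st.1, 0)) (0, 0)
  if s.2 ≥ 2 then s.1 + 1 else s.1

-- ===== PORT B =====
def count_consonant_clusters_py_alt (text : String) : Int :=
  let bs := (PySem.Chars.lower text.toList).map pvIsCons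
  ((List.zip (false :: bs) (List.zip bs (bs.drop 1 ++ [false]))).countP
    (fun x => !x.1 && x.2.1 && x.2.2) : Int)

-- ===== PRECONDITION & SPEC =====
def Spec_count_consonant_clusters_py (text : String) (out : Int) : Prop := out = count_consonant_clusters_py_alt text
instance (text : String) (out : Int) : Decidable (Spec_count_consonant_clusters_py text out) := by unfold Spec_count_consonant_clusters_py; infer_instance

-- ===== CLAIM (what is proved, stated in full; the proofs are below) =====
def Claim_equal_count_consonant_clusters_py : Prop := ∀ (text : String), Dom_count_consonant_clusters_py text → Spec_count_consonant_clusters_py text (count_consonant_clusters_py text)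

-- ===== LEMMAS AND PROOFS =====

-- A's loop body and post-loop flush, named for the proofs
def pvStep (st : Int × Int) (b : Bool) : Int × Int :=
  if b then (st.1, st.2 + 1) else (if st.2 ≥ 2 then st.1 + 1 else st.1, 0)

def pvFlush (st : Int × Int) : Int := if st.2 ≥ 2 then st.1 + 1 else st.1

-- the count B computes, as a structural recursion carrying the previous mask bit
def pvBcount : Bool → List Bool → Int
  | _, [] => 0
  | p, c :: t => (if !p && c && t.headD false then 1 else 0) + pvBcount c t

-- B's zip-count, with a generalized "previous" pad bit
def pvZcount (p : Bool) (bs : List Bool) : Int :=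
  ((List.zip (p :: bs) (List.zip bs (bs.drop 1 ++ [false]))).countP
    (fun x => !x.1 && x.2.1 && x.2.2) : Int)

lemma pvZcount_cons (p c : Bool) (t : List Bool) :
    pvZcount p (c :: t) = (if !p && c && t.headD false then 1 else 0) + pvZcount c t := by
  cases t with
  | nil => simp [pvZcount]
  | cons x t' => simp [pvZcount, List.zip, List.countP_cons]; split_ifs <;> omega

lemma pvZcount_eq_pvBcount (bs : List Bool) : ∀ p, pvZcount p bs = pvBcount p bs := by
  induction bs with
  | nil => intro p; simp [pvZcount, pvBcount]
  | cons c t ih => intro p; rw [pvZcount_cons, pvBcount, ih]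

-- A's fold with a pending run of r consonants, flushed, equals the clusters counted so far
-- plus B's look-ahead count (+1 if the pending run already has ≥2, or will reach 2 next).
lemma pvA_fold (bs : List Bool) : ∀ (cl r : Int), 0 ≤ r →
    pvFlush (bs.foldl pvStep (cl, r))
    = cl + pvBcount (decide (1 ≤ r)) bs
        + (if 2 ≤ r then 1 else if r = 1 ∧ bs.headD false = true then 1 else 0) := by
  induction bs with
  | nil =>
    intro cl r hr
    simp only [List.foldl_nil, pvFlush, pvBcount, List.headD]
    split_ifs <;> simp_all
  | cons b t ih =>
    intro cl r hr
    cases b with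
    | true =>
      rw [List.foldl_cons, show pvStep (cl, r) true = (cl, r + 1) from rfl,
        ih cl (r + 1) (by omega), pvBcount]
      rcases Int.lt_or_le r 1 with h1 | h1
      · have hr0 : r = 0 := by omega
        subst hr0
        simp only [List.headD]
        split_ifs <;> simp_all <;> omega
      · have h1' : decide (1 ≤ r) = true := by simp [h1]
        rw [show decide (1 ≤ r + 1) = true by simp; omega, h1']
        simp only [List.headD]
        split_ifs <;> simp_all <;> omega
    | false =>
      rw [List.foldl_cons,
        show pvStep (cl, r) false = (if r ≥ 2 then cl + 1 else cl, 0) from rfl,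
        ih _ 0 le_rfl, pvBcount]
      split_ifs <;> simp_all <;> omega

theorem pv_main (text : String) :
    count_consonant_clusters_py text = count_consonant_clusters_py_alt text := by
  simp only [count_consonant_clusters_py, count_consonant_clusters_py_alt]
  rw [show (fun (st : Int × Int) c =>
        if pvIsCons c then (st.1, st.2 + 1)
        else (if st.2 ≥ 2 then st.1 + 1 else st.1, 0))
      = (fun (st : Int × Int) c => pvStep st (pvIsCons c)) from rfl,
    ← List.foldl_map (f := pvIsCons) (g := pvStep)]
  rw [show ∀ s : Int × Int, (if s.2 ≥ 2 then s.1 + 1 else s.1) = pvFlush s from fun _ => rfl]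
  rw [pvA_fold _ 0 0 le_rfl,
    show ((List.zip (false :: (PySem.Chars.lower text.toList).map pvIsCons)
        (List.zip ((PySem.Chars.lower text.toList).map pvIsCons)
          (((PySem.Chars.lower text.toList).map pvIsCons).drop 1 ++ [false]))).countP
      (fun x => !x.1 && x.2.1 && x.2.2) : Int)
      = pvZcount false ((PySem.Chars.lower text.toList).map pvIsCons) from rfl,
    pvZcount_eq_pvBcount]
  simp

-- ===== VERDICT (by name: the statement is the Claim_ definition above) =====
theorem count_consonant_clusters_py_spec : Claim_equal_count_consonant_clusters_py := by
  intro text _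
  unfold Spec_count_consonant_clusters_py
  exact pv_main text
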